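-- pv_equiv track=rewrite | github.com/pywebio/PyWebIO | pywebio/output.py | _left_strip_multiple_line_string_literal
-- ===== SOURCE A (Python) =====
-- def _left_strip_multiple_line_string_literal(s):
--     """Remove the indent for code format in string literal
--
--     * The first line may have no leading whitespace
--     * There may be empty line in s (since PyCharm will remove the line trailing whitespace)
--     """
--     lines = s.splitlines()
--     if len(lines) < 2:
--         return s
--
--     line = ''
--     for line in lines[1:]:
--         if line:
--             break
--
--     strip_cnt = 1
--     while line[:strip_cnt] in (' ' * strip_cnt, '\t' * strip_cnt):
--         strip_cnt += 1
--
--     for line in lines[1:]: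
--         while line.strip() and line[:strip_cnt] not in (' ' * strip_cnt, '\t' * strip_cnt):
--             strip_cnt -= 1
--
--     lines_ = [i[strip_cnt:] for i in lines[1:]]
--     return '\n'.join(lines[:1] + lines_)
-- ===== SOURCE B (Python) =====
-- def _left_strip_multiple_line_string_literal(s):
--     """Remove the indent for code format in string literal (binary-search version)."""
--     lines = s.splitlines()
--     if len(lines) < 2:
--         return s
--     tail = lines[1:]
--     first = next((l for l in tail if l), '')
--     c = first[:1]
--     seed = (len(first) - len(first.lstrip(c)) if c in (' ', '\t') else 0) + 1
--     content = [l for l in tail if l.strip()]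
--     lo, hi = 0, seed
--     while lo < hi:
--         mid = (lo + hi + 1) // 2
--         if all(l[:mid] in (' ' * mid, '\t' * mid) for l in content):
--             lo = mid
--         else:
--             hi = mid - 1
--     return '\n'.join([lines[0]] + [l[lo:] for l in tail])
-- ===== Notes on version B (the rewrite author's own statement) =====
-- stated objective: alternative
-- what changed: Replaced A's overshoot-then-decrement pair of while loops with a binary search over [0, seed] for the largest strip width whose all-lines uniform-whitespace-prefix predicate holds (content lines prefiltered once, seed from the first non-empty line via lstrip), trading per-line clamping for O(log k) whole-list predicate checks.
import Mathlib
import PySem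

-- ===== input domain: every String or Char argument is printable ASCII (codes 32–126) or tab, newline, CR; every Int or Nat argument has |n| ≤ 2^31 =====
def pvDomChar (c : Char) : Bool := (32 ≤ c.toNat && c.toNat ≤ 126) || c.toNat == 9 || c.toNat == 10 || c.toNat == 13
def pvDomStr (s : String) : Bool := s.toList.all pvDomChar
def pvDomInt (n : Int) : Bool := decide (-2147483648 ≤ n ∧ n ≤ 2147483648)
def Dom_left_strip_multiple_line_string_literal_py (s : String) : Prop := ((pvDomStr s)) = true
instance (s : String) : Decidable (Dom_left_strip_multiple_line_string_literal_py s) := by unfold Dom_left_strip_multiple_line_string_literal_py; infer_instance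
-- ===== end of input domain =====

-- B replaces A's overshoot-then-clamp pair of while loops by a BINARY SEARCH for the largest
-- strip width whose uniform-whitespace-prefix predicate holds on all content lines (objective: alternative).

-- ===== PORT A =====

-- line[:cnt] in (' '*cnt, '\t'*cnt)
def pvUniform (line : List Char) (cnt : Nat) : Bool :=
  decide (line.take cnt = List.replicate cnt ' ') || decide (line.take cnt = List.replicate cnt '\t')

-- 'line = ""; for line in ls: if line: break' — loop variable keeps its last value
def pvFirstLine : List Char → List (List Char) → List Char
  | prev, [] => prev
  | _, l :: rest => if l ≠ [] then l else pvFirstLine l rest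

-- 'while line[:strip_cnt] in (' '*strip_cnt, '\t'*strip_cnt): strip_cnt += 1'
def pvIncr (line : List Char) (cnt : Nat) : Nat :=
  if pvUniform line cnt then pvIncr line (cnt + 1) else cnt
termination_by line.length + 1 - cnt
decreasing_by
  have h : (line.take cnt).length ≤ line.length := by simp
  rcases Bool.or_eq_true_iff.mp (by assumption) with h1 | h1 <;>
    · have := of_decide_eq_true h1
      have hlen : (line.take cnt).length = cnt := by rw [this]; simp
      omega

-- 'while line.strip() and line[:strip_cnt] not in (...): strip_cnt -= 1'
-- (structural recursion on cnt: at cnt = 0 the prefix test always holds, so the loop stops)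
def pvDecr (line : List Char) : Nat → Nat
  | 0 => 0
  | cnt + 1 =>
    if !(PySem.Chars.strip line).isEmpty && !pvUniform line (cnt + 1) then pvDecr line cnt
    else cnt + 1

def left_strip_multiple_line_string_literal_py (s : String) : String :=
  let lines := PySem.Chars.splitlines s.toList
  if lines.length < 2 then s
  else
    let line := pvFirstLine [] (lines.drop 1)   -- lines[1:] (slice from 1 = drop 1, exact)
    let cnt1 := pvIncr line 1
    let cnt2 := (lines.drop 1).foldl (fun cnt l => pvDecr l cnt) cnt1
    -- i[strip_cnt:] with strip_cnt ≥ 0 is List.drop (exact)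
    String.ofList (PySem.Chars.join ['\n'] (lines.take 1 ++ (lines.drop 1).map (fun i => i.drop cnt2)))

-- ===== PORT B =====

-- 'all(l[:mid] in (' '*mid, '\t'*mid) for l in content)'
def pvOkB (content : List (List Char)) (k : Nat) : Bool :=
  content.all (fun l =>
    decide (l.take k = List.replicate k ' ') || decide (l.take k = List.replicate k '\t'))

-- 'while lo < hi: mid = (lo+hi+1)//2; if ok(mid): lo = mid else: hi = mid-1'
def pvBS (content : List (List Char)) (lo hi : Nat) : Nat :=
  if lo < hi then
    let mid := (lo + hi + 1) / 2
    if pvOkB content mid then pvBS content mid hi else pvBS content lo (mid - 1)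
  else lo
termination_by hi - lo
decreasing_by all_goals omega

def left_strip_multiple_line_string_literal_py_alt (s : String) : String :=
  let lines := PySem.Chars.splitlines s.toList
  if lines.length < 2 then s
  else
    let tail := lines.drop 1
    let first := (tail.find? (fun l => !l.isEmpty)).getD []   -- next((l for l in tail if l), '')
    -- 'seed = (len(first) - len(first.lstrip(c)) if c in (" ", "\t") else 0) + 1' with c = first[:1]
    let seed := (match first with
      | [] => 0
      | c :: _ =>
        if c = ' ' ∨ c = '\t' then first.length - (first.dropWhile (fun x => x = c)).length
        else 0) + 1
    let content := tail.filter (fun l => !(PySem.Chars.strip l).isEmpty)   -- [l for l in tail if l.strip()]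
    let cnt := pvBS content 0 seed
    String.ofList (PySem.Chars.join ['\n'] (lines.head! :: tail.map (fun l => l.drop cnt)))

-- ===== PRECONDITION & SPEC =====
def Spec_left_strip_multiple_line_string_literal_py (s : String) (out : String) : Prop := out = left_strip_multiple_line_string_literal_py_alt s
instance (s : String) (out : String) : Decidable (Spec_left_strip_multiple_line_string_literal_py s out) := by unfold Spec_left_strip_multiple_line_string_literal_py; infer_instance

-- ===== CLAIM (what is proved, stated in full; the proofs are below) =====
def Claim_equal_left_strip_multiple_line_string_literal_py : Prop := ∀ (s : String), Dom_left_strip_multiple_line_string_literal_py s → Spec_left_strip_multiple_line_string_literal_py s (left_strip_multiple_line_string_literal_py s)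

-- ===== LEMMAS AND PROOFS =====

-- length of the leading run of a single whitespace char (proof-side characterisation)
def pvRunB (c : Char) : List Char → Nat
  | [] => 0
  | x :: xs => if x = c then pvRunB c xs + 1 else 0

def pvULen : List Char → Nat
  | [] => 0
  | c :: xs => if c = ' ' ∨ c = '\t' then pvRunB c (c :: xs) else 0

theorem take_eq_replicate_iff (c : Char) (cnt : Nat) (line : List Char) :
    line.take cnt = List.replicate cnt c ↔ cnt ≤ pvRunB c line := by
  induction cnt generalizing line with
  | zero => simp
  | succ n ih =>
    cases line with
    | nil => simp [pvRunB, List.replicate_succ]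
    | cons x xs =>
      by_cases hx : x = c
      · subst hx
        simp [pvRunB, List.replicate_succ, ih]
      · simp [pvRunB, List.replicate_succ, hx]

theorem runB_of_head_ne {c x : Char} (xs : List Char) (h : x ≠ c) : pvRunB c (x :: xs) = 0 := by
  simp [pvRunB, h]

theorem uniform_iff (line : List Char) (cnt : Nat) :
    pvUniform line cnt = true ↔ cnt ≤ pvULen line := by
  unfold pvUniform
  rw [Bool.or_eq_true_iff, decide_eq_true_iff, decide_eq_true_iff,
      take_eq_replicate_iff, take_eq_replicate_iff]
  cases line with
  | nil => simp [pvULen, pvRunB]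
  | cons x xs =>
    by_cases hs : x = ' '
    · subst hs
      rw [runB_of_head_ne (c := '\t') xs (by decide)]
      simp [pvULen]
      omega
    · by_cases ht : x = '\t'
      · subst ht
        rw [runB_of_head_ne (c := ' ') xs (by decide)]
        simp [pvULen]
        omega
      · rw [runB_of_head_ne xs hs, runB_of_head_ne xs ht]
        simp [pvULen, hs, ht]

theorem pvIncr_eq_aux (line : List Char) (k cnt : Nat)
    (hk : pvULen line + 1 - cnt ≤ k) :
    pvIncr line cnt = max cnt (pvULen line + 1) := by
  induction k generalizing cnt with
  | zero =>
    rw [pvIncr]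
    have h : ¬ (pvUniform line cnt = true) := by
      rw [uniform_iff]; omega
    rw [if_neg h]
    omega
  | succ n ih =>
    rw [pvIncr]
    by_cases h : pvUniform line cnt = true
    · have hle : cnt ≤ pvULen line := (uniform_iff line cnt).mp h
      rw [if_pos h, ih (cnt + 1) (by omega)]
      omega
    · have : ¬ cnt ≤ pvULen line := fun hle => h ((uniform_iff line cnt).mpr hle)
      rw [if_neg h]
      omega

theorem pvIncr_eq (line : List Char) (cnt : Nat) :
    pvIncr line cnt = max cnt (pvULen line + 1) :=
  pvIncr_eq_aux line (pvULen line + 1 - cnt) cnt le_rfl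

theorem pvDecr_eq (line : List Char) (cnt : Nat) :
    pvDecr line cnt =
      if !(PySem.Chars.strip line).isEmpty then min cnt (pvULen line) else cnt := by
  induction cnt with
  | zero =>
    cases h : (PySem.Chars.strip line).isEmpty <;> simp [pvDecr]
  | succ n ih =>
    rw [pvDecr]
    by_cases hs : (PySem.Chars.strip line).isEmpty = true
    · simp [hs]
    · have hs' : (!(PySem.Chars.strip line).isEmpty) = true := by simp [hs]
      by_cases hu : pvUniform line (n + 1) = true
      · have : n + 1 ≤ pvULen line := (uniform_iff line (n + 1)).mp hu
        simp only [hs', hu, Bool.not_true, Bool.and_false, Bool.false_eq_true, if_false, if_true]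
        omega
      · have hle : ¬ n + 1 ≤ pvULen line := fun h => hu ((uniform_iff line (n + 1)).mpr h)
        have hcond : (!(PySem.Chars.strip line).isEmpty && !pvUniform line (n + 1)) = true := by
          simp [hs, hu]
        rw [if_pos hcond, ih, if_pos hs', if_pos hs']
        omega

theorem pvFirstLine_eq (ls : List (List Char)) :
    pvFirstLine [] ls = ((ls.find? (fun l => !l.isEmpty)).getD []) := by
  induction ls with
  | nil => simp [pvFirstLine]
  | cons l rest ih =>
    by_cases h : l = []
    · subst h
      simpa [pvFirstLine, List.find?] using ih
    · have h' : (!l.isEmpty) = true := by simp [h]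
      simp [pvFirstLine, h, List.find?, h']

theorem runB_eq_dropWhile (c : Char) (l : List Char) :
    pvRunB c l = l.length - (l.dropWhile (fun x => x = c)).length := by
  induction l with
  | nil => simp [pvRunB]
  | cons x xs ih =>
    by_cases h : x = c
    · have hlen : (xs.dropWhile (fun x => x = c)).length ≤ xs.length :=
        List.length_dropWhile_le _ _
      simp [pvRunB, h, List.dropWhile, ih]
      omega
    · simp [pvRunB, h, List.dropWhile]

-- the min-fold value both sides compute
def pvMinFold (content : List (List Char)) (init : Nat) : Nat :=
  content.foldl (fun c l => min c (pvULen l)) init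

theorem minFold_le_init (content : List (List Char)) (init : Nat) :
    pvMinFold content init ≤ init := by
  induction content generalizing init with
  | nil => simp [pvMinFold]
  | cons l rest ih =>
    calc pvMinFold (l :: rest) init = pvMinFold rest (min init (pvULen l)) := rfl
      _ ≤ min init (pvULen l) := ih _
      _ ≤ init := min_le_left _ _

theorem minFold_le_mem (content : List (List Char)) (init : Nat) (l : List Char)
    (h : l ∈ content) : pvMinFold content init ≤ pvULen l := by
  induction content generalizing init with
  | nil => simp at h
  | cons x rest ih =>
    rcases List.mem_cons.mp h with h | h
    · subst h
      calc pvMinFold (l :: rest) init = pvMinFold rest (min init (pvULen l)) := rfl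
        _ ≤ min init (pvULen l) := minFold_le_init _ _
        _ ≤ pvULen l := min_le_right _ _
    · exact ih _ h

theorem le_minFold (content : List (List Char)) (init k : Nat)
    (h1 : k ≤ init) (h2 : ∀ l ∈ content, k ≤ pvULen l) : k ≤ pvMinFold content init := by
  induction content generalizing init with
  | nil => simpa [pvMinFold] using h1
  | cons x rest ih =>
    have : k ≤ min init (pvULen x) :=
      le_min h1 (h2 x (List.mem_cons_self))
    exact ih _ this (fun l hl => h2 l (List.mem_cons_of_mem _ hl))

theorem okB_iff (content : List (List Char)) (k : Nat) :
    pvOkB content k = true ↔ ∀ l ∈ content, k ≤ pvULen l := by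
  have : pvOkB content k = content.all (fun l => pvUniform l k) := rfl
  rw [this, List.all_eq_true]
  constructor
  · intro h l hl; exact (uniform_iff l k).mp (h l hl)
  · intro h l hl; exact (uniform_iff l k).mpr (h l hl)

theorem pvBS_eq_aux (content : List (List Char)) (seed : Nat) (n : Nat) :
    ∀ lo hi, hi - lo ≤ n → lo ≤ pvMinFold content seed → pvMinFold content seed ≤ hi →
      hi ≤ seed → pvBS content lo hi = pvMinFold content seed := by
  induction n with
  | zero =>
    intro lo hi hn h1 h2 h3
    rw [pvBS]
    have : ¬ lo < hi := by omega
    rw [if_neg this]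
    omega
  | succ n ih =>
    intro lo hi hn h1 h2 h3
    rw [pvBS]
    by_cases hlt : lo < hi
    · rw [if_pos hlt]
      by_cases hok : pvOkB content ((lo + hi + 1) / 2) = true
      · have hmem : ∀ l ∈ content, (lo + hi + 1) / 2 ≤ pvULen l := (okB_iff _ _).mp hok
        have hmid : (lo + hi + 1) / 2 ≤ pvMinFold content seed :=
          le_minFold content seed _ (by omega) hmem
        simp only [hok, if_true]
        exact ih _ hi (by omega) hmid h2 h3
      · have hgt : ¬ (lo + hi + 1) / 2 ≤ pvMinFold content seed := by
          intro hle
          exact hok ((okB_iff _ _).mpr (fun l hl =>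
            le_trans hle (minFold_le_mem content seed l hl)))
        simp only [hok, Bool.false_eq_true, if_false]
        exact ih lo _ (by omega) h1 (by omega) (by omega)
    · rw [if_neg hlt]
      omega

theorem pvBS_eq (content : List (List Char)) (seed : Nat) :
    pvBS content 0 seed = pvMinFold content seed :=
  pvBS_eq_aux content seed seed 0 seed (by omega) (Nat.zero_le _)
    (le_trans (minFold_le_init _ _) le_rfl) le_rfl

theorem seed_eq_uLen (first : List Char) :
    (match first with
      | [] => 0
      | c :: _ =>
        if c = ' ' ∨ c = '\t' then first.length - (first.dropWhile (fun x => x = c)).length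
        else 0) = pvULen first := by
  cases first with
  | nil => simp [pvULen]
  | cons c xs =>
    by_cases h : c = ' ' ∨ c = '\t'
    · simp only [h, if_true, pvULen, ← runB_eq_dropWhile]
    · simp [pvULen, h]

-- ===== VERDICT (by name: the statement is the Claim_ definition above) =====
theorem left_strip_multiple_line_string_literal_py_spec : Claim_equal_left_strip_multiple_line_string_literal_py := by
  intro s _
  unfold Spec_left_strip_multiple_line_string_literal_py
  unfold left_strip_multiple_line_string_literal_py left_strip_multiple_line_string_literal_py_alt
  generalize PySem.Chars.splitlines s.toList = lines
  by_cases h : lines.length < 2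
  · simp [h]
  · simp only [h, if_false]
    cases lines with
    | nil => simp at h
    | cons l0 rest =>
      simp only [List.drop_succ_cons, List.drop_zero, List.take_succ_cons, List.take_zero,
        List.head!_cons, List.singleton_append, seed_eq_uLen]
      have hseed : pvIncr (pvFirstLine [] rest) 1 =
          pvULen ((rest.find? (fun l => !l.isEmpty)).getD []) + 1 := by
        rw [pvFirstLine_eq, pvIncr_eq]; omega
      have hfoldA : ∀ (init : Nat),
          rest.foldl (fun cnt l => pvDecr l cnt) init =
          pvMinFold (rest.filter (fun l => !(PySem.Chars.strip l).isEmpty)) init := by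
        intro init
        rw [pvMinFold, List.foldl_filter]
        simp only [pvDecr_eq]
      rw [hseed, hfoldA, pvBS_eq]
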